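-- pv_equiv track=rewrite | github.com/miliar/Code_Jam_Webscraper | solutions_python/solutions_year16_round0_nr2/2457.py | get_flipping_position
-- ===== SOURCE A (Python) =====
-- def get_flipping_position(pancakes):
--     all_minus = True
--     for idx, char in enumerate(pancakes):
--         if char == '+':
--             all_minus = False
--             break
--     if all_minus == True:
--         return len(pancakes) - 1
--
--     start = pancakes[0]
--     for idx, char in enumerate(pancakes):
--         if idx + 1 == len(pancakes):
--             return None
--         if pancakes[idx] != pancakes[idx+1]:
--             return idx
-- ===== SOURCE B (Python) =====
-- def get_flipping_position(pancakes):
--     # One fused reverse pass: walking back-to-front, maintain whether a '+' occurs,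
--     # the first adjacent-difference index relative to the current suffix, and the
--     # previously seen (i.e. next) character.
--     has_plus = False
--     flip = None
--     nxt = None
--     for ch in reversed(pancakes):
--         if ch == '+':
--             has_plus = True
--         if nxt is not None and ch != nxt:
--             flip = 0
--         elif flip is not None:
--             flip += 1
--         nxt = ch
--     if not has_plus:
--         return len(pancakes) - 1
--     return flip
-- ===== Notes on version B (the rewrite author's own statement) =====
-- stated objective: alternative
-- what changed: Replaces A's two staged forward scans (break-loop detecting '+', then adjacent-pair loop) by one fused reverse traversal that builds the answer back-to-front, maintaining (has_plus, flip index relative to the suffix, previous char) in a single accumulator.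
import Mathlib
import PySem

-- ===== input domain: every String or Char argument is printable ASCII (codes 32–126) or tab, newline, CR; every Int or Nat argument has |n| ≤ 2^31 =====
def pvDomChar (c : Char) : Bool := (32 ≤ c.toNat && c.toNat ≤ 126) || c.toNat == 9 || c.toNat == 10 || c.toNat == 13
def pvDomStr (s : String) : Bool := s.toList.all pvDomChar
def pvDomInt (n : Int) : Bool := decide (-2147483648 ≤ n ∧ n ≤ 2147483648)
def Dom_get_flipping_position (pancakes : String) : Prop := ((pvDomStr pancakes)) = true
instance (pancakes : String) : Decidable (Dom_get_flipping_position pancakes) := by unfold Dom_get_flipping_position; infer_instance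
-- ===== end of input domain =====

-- B replaces A's two forward scans by one fused reverse pass building the answer
-- back-to-front (objective: alternative, same O(n) cost); same return value everywhere.

-- ===== PORT A =====
-- A's second loop: at each idx, if idx+1 == len return None, else if chars at idx and
-- idx+1 differ return idx; otherwise continue. Transcribed as structural recursion over
-- the remaining characters, carrying idx.
def pvALoop : List Char → Int → Option Int
  | [], _ => none
  | [_], _ => none
  | a :: b :: rest, idx =>
    if a ≠ b then some idx else pvALoop (b :: rest) (idx + 1)

def get_flipping_position (pancakes : String) : Option Int :=
  let cs := pancakes.toList
  -- first loop: all_minus starts True, set False (break) at the first '+'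
  let all_minus := !(cs.any (· == '+'))
  if all_minus then some ((cs.length : Int) - 1)
  else pvALoop cs 0

-- ===== PORT B =====
-- B's loop body: 'for ch in reversed(pancakes)' = foldl over the reversed char list,
-- state (has_plus, flip, nxt) exactly as in Source B.
def pvBStep (s : Bool × Option Int × Option Char) (ch : Char) : Bool × Option Int × Option Char :=
  let hp := if ch == '+' then true else s.1
  let flip : Option Int :=
    match s.2.2 with
    | some n => if ch ≠ n then some 0 else s.2.1.map (· + 1)
    | none => s.2.1.map (· + 1)
  (hp, flip, some ch)

def get_flipping_position_alt (pancakes : String) : Option Int :=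
  let st := pancakes.toList.reverse.foldl pvBStep (false, none, none)
  if !st.1 then some ((pancakes.toList.length : Int) - 1)
  else st.2.1

-- ===== PRECONDITION & SPEC =====
def Spec_get_flipping_position (pancakes : String) (out : Option Int) : Prop := out = get_flipping_position_alt pancakes
instance (pancakes : String) (out : Option Int) : Decidable (Spec_get_flipping_position pancakes out) := by unfold Spec_get_flipping_position; infer_instance

-- ===== CLAIM (what is proved, stated in full; the proofs are below) =====
def Claim_equal_get_flipping_position : Prop := ∀ (pancakes : String), Dom_get_flipping_position pancakes → Spec_get_flipping_position pancakes (get_flipping_position pancakes)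

-- ===== LEMMAS AND PROOFS =====

-- the flip component B's fold computes, as a closed function of the list
def pvFlipSpec : List Char → Option Int
  | [] => none
  | c :: l => if l.dropWhile (· == c) = [] then none
              else some ((l.takeWhile (· == c)).length : Int)

-- B's fold, characterised: foldl over the reverse = foldr of the flipped step
theorem pvBFold_char (cs : List Char) :
    cs.reverse.foldl pvBStep (false, none, none) =
      (cs.any (· == '+'), pvFlipSpec cs, cs.head?) := by
  rw [List.foldl_reverse]
  induction cs with
  | nil => rfl
  | cons c l ih =>
    rw [List.foldr_cons, ih]
    simp only [pvBStep, List.any_cons, List.head?_cons, Prod.mk.injEq]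
    refine ⟨by cases h : c == '+' <;> simp, ?_, trivial⟩
    cases l with
    | nil => simp [pvFlipSpec]
    | cons b t =>
      by_cases h : c = b
      · subst h
        simp only [pvFlipSpec, ne_eq, not_true_eq_false, if_false, List.head?_cons,
          List.dropWhile_cons, List.takeWhile_cons, BEq.rfl, if_true]
        split_ifs with hdw
        all_goals rfl
      · have hb : (b == c) = false := beq_eq_false_iff_ne.mpr (fun e => h e.symm)
        simp [pvFlipSpec, hb, h]

-- Characterisation of A's loop on a nonempty list
theorem pvALoop_char (l : List Char) (c : Char) (idx : Int) :
    pvALoop (c :: l) idx =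
      if l.dropWhile (· == c) = [] then none
      else some (idx + ((l.takeWhile (· == c)).length : Int)) := by
  induction l generalizing c idx with
  | nil => simp [pvALoop]
  | cons b rest ih =>
    by_cases h : b = c
    · subst h
      have e1 : pvALoop (b :: b :: rest) idx = pvALoop (b :: rest) (idx + 1) := by
        simp [pvALoop]
      have e2 : (b :: rest).dropWhile (· == b) = rest.dropWhile (· == b) := by
        simp [List.dropWhile]
      have e3 : (b :: rest).takeWhile (· == b) = b :: rest.takeWhile (· == b) := by
        simp [List.takeWhile]
      rw [e1, ih, e2, e3]
      split_ifs
      · rfl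
      · congr 1
        simp only [List.length_cons]
        push_cast
        ring
    · have hb : (b == c) = false := by simp [h]
      have e1 : pvALoop (c :: b :: rest) idx = some idx := by
        simp [pvALoop, Ne.symm h]
      rw [e1]
      simp [List.dropWhile, List.takeWhile, hb]

-- ===== VERDICT (by name: the statement is the Claim_ definition above) =====
theorem get_flipping_position_spec : Claim_equal_get_flipping_position := by
  intro pancakes _
  unfold Spec_get_flipping_position
  unfold get_flipping_position get_flipping_position_alt
  rw [pvBFold_char]
  by_cases hany : pancakes.toList.any (· == '+') = true
  · simp only [hany, Bool.not_true, if_false, Bool.false_eq_true]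
    obtain ⟨c, l, hcl⟩ : ∃ c l, pancakes.toList = c :: l := by
      cases h : pancakes.toList with
      | nil => rw [h] at hany; simp at hany
      | cons a t => exact ⟨a, t, rfl⟩
    rw [hcl, pvALoop_char, pvFlipSpec]
    split_ifs with hdw
    · rfl
    · simp
  · simp only [Bool.not_eq_true] at hany
    simp [hany]
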